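-- pv_equiv track=rewrite | github.com/JulianaSalfity/python | parcial2final.py | cant_seguidos
-- ===== SOURCE A (Python) =====
-- def cant_seguidos(animal: str,tipos_pacientes_atendidos: list[str]) -> list[(int,int)]:
--     tuplas_animal: list =[]
--     indice:int = -1
--     cant_animal: int = 0
--     for paciente in tipos_pacientes_atendidos:
--         indice += 1
--         if paciente == animal:
--             cant_animal += 1
--         elif paciente != animal and cant_animal > 0:
--             tuplas_animal.append((indice-cant_animal, cant_animal))
--             cant_animal = 0
--     if cant_animal >  0:
--         tuplas_animal.append((indice-cant_animal+1, cant_animal))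
--     return tuplas_animal
-- ===== SOURCE B (Python) =====
-- def cant_seguidos(animal: str, tipos_pacientes_atendidos: list[str]) -> list[(int, int)]:
--     # Two-pointer run scanner: split the list into maximal runs of equal
--     # elements and emit (start, length) for the runs that match `animal`.
--     res = []
--     i = 0
--     n = len(tipos_pacientes_atendidos)
--     while i < n:
--         j = i + 1
--         while j < n and tipos_pacientes_atendidos[j] == tipos_pacientes_atendidos[i]:
--             j += 1
--         if tipos_pacientes_atendidos[i] == animal:
--             res.append((i, j - i))
--         i = j
--     return res
-- ===== Notes on version B (the rewrite author's own statement) =====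
-- stated objective: alternative
-- what changed: Replaces A's per-element state machine (running counter closed on mismatch plus a post-loop flush) with a two-pointer scan over maximal runs of equal elements that emits (start, length) directly per matching run.
import Mathlib
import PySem

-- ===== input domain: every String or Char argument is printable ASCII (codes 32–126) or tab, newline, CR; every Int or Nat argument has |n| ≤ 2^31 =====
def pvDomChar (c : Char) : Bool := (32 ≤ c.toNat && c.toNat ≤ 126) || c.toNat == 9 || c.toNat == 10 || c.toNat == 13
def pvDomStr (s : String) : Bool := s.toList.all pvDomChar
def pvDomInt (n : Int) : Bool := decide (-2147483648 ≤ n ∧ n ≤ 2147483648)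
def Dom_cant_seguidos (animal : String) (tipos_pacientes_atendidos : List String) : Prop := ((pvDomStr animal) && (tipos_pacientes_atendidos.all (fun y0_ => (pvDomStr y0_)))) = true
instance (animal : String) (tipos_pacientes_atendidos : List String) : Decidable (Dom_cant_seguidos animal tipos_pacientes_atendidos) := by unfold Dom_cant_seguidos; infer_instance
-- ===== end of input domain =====

-- B replaces A's per-element counter state machine with a two-pointer scan over
-- maximal runs of equal elements (objective: alternative; same O(n) cost).


-- ===== PORT A =====
-- fold state: (indice, cant_animal, tuplas_animal), exactly A's three mutables
def cantStepA (animal : String) (st : Int × Int × List (Int × Int)) (paciente : String) :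
    Int × Int × List (Int × Int) :=
  let indice := st.1 + 1
  let cant := st.2.1
  let acc := st.2.2
  if paciente == animal then (indice, cant + 1, acc)
  else if paciente != animal && decide (cant > 0) then
    (indice, 0, acc ++ [(indice - cant, cant)])
  else (indice, cant, acc)

def cant_seguidos (animal : String) (tipos_pacientes_atendidos : List String) : List (Int × Int) :=
  let st := tipos_pacientes_atendidos.foldl (cantStepA animal) (-1, 0, [])
  if st.2.1 > 0 then st.2.2 ++ [(st.1 - st.2.1 + 1, st.2.1)] else st.2.2

-- ===== PORT B =====
-- B's inner while loop "advance j while equal to the run head" is the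
-- takeWhile/dropWhile split of the tail; the outer while loop is this recursion.
def cantRunScan (animal : String) : List String → Int → List (Int × Int)
  | [], _ => []
  | x :: rest, i =>
    let run := rest.takeWhile (· == x)
    let len : Int := 1 + (run.length : Int)
    (if x == animal then [(i, len)] else []) ++
      cantRunScan animal (rest.dropWhile (· == x)) (i + len)
termination_by xs _ => xs.length
decreasing_by
  simpa using Nat.lt_succ_of_le (List.length_dropWhile_le (· == x) rest)

def cant_seguidos_alt (animal : String) (tipos_pacientes_atendidos : List String) : List (Int × Int) :=
  cantRunScan animal tipos_pacientes_atendidos 0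

-- ===== PRECONDITION & SPEC =====
def Spec_cant_seguidos (animal : String) (tipos_pacientes_atendidos : List String) (out : List (Int × Int)) : Prop := out = cant_seguidos_alt animal tipos_pacientes_atendidos
instance (animal : String) (tipos_pacientes_atendidos : List String) (out : List (Int × Int)) : Decidable (Spec_cant_seguidos animal tipos_pacientes_atendidos out) := by unfold Spec_cant_seguidos; infer_instance

-- ===== CLAIM (what is proved, stated in full; the proofs are below) =====
def Claim_equal_cant_seguidos : Prop := ∀ (animal : String) (tipos_pacientes_atendidos : List String), Dom_cant_seguidos animal tipos_pacientes_atendidos → Spec_cant_seguidos animal tipos_pacientes_atendidos (cant_seguidos animal tipos_pacientes_atendidos)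

-- ===== LEMMAS AND PROOFS =====

-- element-wise reading of A's fold, with p = index of the next element
def cantH (animal : String) : List String → Int → Int → List (Int × Int)
  | [], p, cant => if cant > 0 then [(p - cant, cant)] else []
  | x :: rest, p, cant =>
    if x == animal then cantH animal rest (p + 1) (cant + 1)
    else (if cant > 0 then [(p - cant, cant)] else []) ++ cantH animal rest (p + 1) 0

lemma cantFoldA (animal : String) (xs : List String) :
    ∀ (i cant : Int) (acc : List (Int × Int)), 0 ≤ cant →
    (let st := xs.foldl (cantStepA animal) (i, cant, acc)
     if st.2.1 > 0 then st.2.2 ++ [(st.1 - st.2.1 + 1, st.2.1)] else st.2.2)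
    = acc ++ cantH animal xs (i + 1) cant := by
  induction xs with
  | nil =>
    intro i cant acc _
    simp only [List.foldl_nil, cantH]
    split_ifs with h
    · have : i - cant + 1 = i + 1 - cant := by ring
      rw [this]
    · simp
  | cons x rest ih =>
    intro i cant acc hc
    simp only [List.foldl_cons, cantH, cantStepA]
    by_cases hx : (x == animal) = true
    · simp only [if_pos hx]
      exact ih (i + 1) (cant + 1) acc (by omega)
    · have hne : (x != animal) = true := by simp [bne, hx]
      simp only [if_neg hx]
      by_cases hgt : cant > 0
      · rw [if_pos (by simp [hne, hgt] : (x != animal && decide (cant > 0)) = true),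
          if_pos hgt]
        have := ih (i + 1) 0 (acc ++ [(i + 1 - cant, cant)]) (le_refl 0)
        rw [this, List.append_assoc]
      · have hc0 : cant = 0 := by omega
        subst hc0
        rw [if_neg (by simp : ¬ (x != animal && decide ((0:Int) > 0)) = true),
          if_neg hgt]
        simpa using ih (i + 1) 0 acc (le_refl 0)

-- one non-animal element at the head of the scan may be folded into the run behind it
lemma cantRunScan_skip (animal x : String) (rest : List String) (p : Int)
    (hx : (x == animal) = false) :
    cantRunScan animal (x :: rest) p = cantRunScan animal rest (p + 1) := by
  cases rest with
  | nil => simp [cantRunScan, hx]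
  | cons y rest2 =>
    by_cases hy : (y == x) = true
    · have hyx : y = x := by simpa using hy
      subst hyx
      simp only [cantRunScan, hx, if_false, List.takeWhile_cons, List.dropWhile_cons,
        beq_self_eq_true, if_true, List.length_cons, List.nil_append]
      congr 1
      push_cast
      ring
    · have hy' : (y == x) = false := by simpa using hy
      have h0 : List.takeWhile (· == x) (y :: rest2) = [] := by
        simp [List.takeWhile_cons, hy']
      have h1 : List.dropWhile (· == x) (y :: rest2) = y :: rest2 := by
        simp [List.dropWhile_cons, hy']
      rw [cantRunScan, h0, h1, if_neg (by simp [hx])]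
      norm_num

-- S1 and S2: cantH agrees with the run scanner
lemma cantH_eq_runScan (animal : String) :
    ∀ (n : ℕ) (xs : List String), xs.length ≤ n →
      (∀ p : Int, cantH animal xs p 0 = cantRunScan animal xs p) ∧
      (∀ (p cant : Int), 0 < cant →
        cantH animal xs p cant =
          (p - cant, cant + ((xs.takeWhile (· == animal)).length : Int)) ::
            cantRunScan animal (xs.dropWhile (· == animal))
              (p + ((xs.takeWhile (· == animal)).length : Int))) := by
  intro n
  induction n with
  | zero =>
    intro xs hlen
    have : xs = [] := by cases xs <;> simp_all
    subst this
    constructor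
    · intro p; simp [cantH, cantRunScan]
    · intro p cant hc; simp [cantH, cantRunScan, if_pos hc]
  | succ n ih =>
    intro xs hlen
    cases xs with
    | nil =>
      constructor
      · intro p; simp [cantH, cantRunScan]
      · intro p cant hc; simp [cantH, cantRunScan, if_pos hc]
    | cons x rest =>
      have hrest := ih rest (by simpa using Nat.le_of_succ_le_succ hlen)
      constructor
      · intro p
        by_cases hx : (x == animal) = true
        · have hxa : x = animal := by simpa using hx
          subst hxa
          have h2 := hrest.2 (p + 1) 1 (by omega)
          simp only [cantH, beq_self_eq_true, if_true]
          norm_num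
          rw [h2]
          simp only [cantRunScan, beq_self_eq_true, if_true, List.singleton_append]
          push_cast
          ring_nf
        · have hx' : (x == animal) = false := by simpa using hx
          rw [cantRunScan_skip animal x rest p hx', ← hrest.1 (p + 1)]
          simp [cantH, hx']
      · intro p cant hc
        by_cases hx : (x == animal) = true
        · have hxa : x = animal := by simpa using hx
          subst hxa
          have h2 := hrest.2 (p + 1) (cant + 1) (by omega)
          simp only [cantH, beq_self_eq_true, if_true]
          rw [h2]
          simp only [List.takeWhile_cons, List.dropWhile_cons, beq_self_eq_true,
            if_true, List.length_cons]
          push_cast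
          ring_nf
        · have hx' : (x == animal) = false := by simpa using hx
          simp only [cantH, hx', if_false, if_pos hc, List.takeWhile_cons,
            List.dropWhile_cons, List.length_nil]
          rw [hrest.1 (p + 1), ← cantRunScan_skip animal x rest p hx']
          norm_num

-- ===== VERDICT (by name: the statement is the Claim_ definition above) =====
theorem cant_seguidos_spec : Claim_equal_cant_seguidos := by
  intro animal xs _
  unfold Spec_cant_seguidos cant_seguidos cant_seguidos_alt
  have h1 := cantFoldA animal xs (-1) 0 [] (le_refl 0)
  simp only [show (-1 : Int) + 1 = 0 by ring] at h1
  simp only [h1, List.nil_append]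
  exact (cantH_eq_runScan animal xs.length xs (le_refl _)).1 0
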